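-- pv_equiv track=rewrite | github.com/bzpwp/algorithm | AtCoder/ガイドライン/codes/dp/部分列dp.py | calcNext
-- ===== SOURCE A (Python) =====
-- def calcNext(S: str):
--     n = len(S)
--     res = [[n] * 26 for _ in range(n+1)]
--     for i in range(n-1, -1, -1):
--         for j in range(26):
--             res[i][j] = res[i+1][j]
--         res[i][ord(S[i]) - ord('a')] = i
--     return res
-- ===== SOURCE B (Python) =====
-- def calcNext(S: str):
--     n = len(S)
--     res = [[n] * 26 for _ in range(n + 1)]
--     for j in range(26):
--         c = chr(ord('a') + j)
--         last = n
--         for i in range(n - 1, -1, -1):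
--             if S[i] == c:
--                 last = i
--             res[i][j] = last
--     return res
-- ===== Notes on version B (the rewrite author's own statement) =====
-- stated objective: alternative
-- what changed: B transposes the loop nest: for each letter j it scans positions right-to-left keeping one scalar `last` and writes column j directly, instead of A's copying the whole 26-wide row i+1 into row i at every position.
-- intended difference: On strings containing a character below 'a' (inside Pre_ these are 'G'..'`', codes 71-96), A's negative row index ord(c)-97 wraps around and records that position in the column of the letter 26 codes higher, polluting the next-occurrence table; B ignores non-lowercase characters, which is the intended table for letters a-z. — e.g. on calcNext("G"): A returns [[0, 1, 1, 1, 1, 1, 1, 1, 1, 1, 1, 1, 1, 1, 1, 1, 1, 1, 1, 1, 1, 1, 1, 1, 1, 1], [1, 1, 1, 1, 1, 1, 1, 1, 1, 1, 1, 1, 1…, B returns [[1, 1, 1, 1, 1, 1, 1, 1, 1, 1, 1, 1, 1, 1, 1, 1, 1, 1, 1, 1, 1, 1, 1, 1, 1, 1], [1, 1, 1, 1, 1, 1, 1, 1, 1, 1, 1, 1, 1…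
import Mathlib
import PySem

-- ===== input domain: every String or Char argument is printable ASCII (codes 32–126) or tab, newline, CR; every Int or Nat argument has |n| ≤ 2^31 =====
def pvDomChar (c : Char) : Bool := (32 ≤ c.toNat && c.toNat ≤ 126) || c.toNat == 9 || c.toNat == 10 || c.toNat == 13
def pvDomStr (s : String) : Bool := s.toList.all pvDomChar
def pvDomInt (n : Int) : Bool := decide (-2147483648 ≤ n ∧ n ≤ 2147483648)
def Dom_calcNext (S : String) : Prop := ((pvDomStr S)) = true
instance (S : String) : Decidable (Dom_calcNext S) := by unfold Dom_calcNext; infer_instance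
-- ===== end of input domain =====

-- B builds the next-occurrence table column by column, keeping one scalar `last` per letter,
-- instead of A's row-by-row copy of the whole 26-wide row (objective: alternative decomposition).

-- ===== PORT A =====
-- Python `l[k] = v` with a possibly negative index: wraps once from the end; out-of-range raises
-- (those inputs are outside Pre_calcNext, where this total function's value is unclaimed).
def pySetItem (l : List Int) (k : Int) (v : Int) : List Int :=
  if 0 ≤ k then l.set k.toNat v else l.set ((l.length : Int) + k).toNat v

-- the body of A's outer loop over i: copy row i+1 into row i entry by entry, then res[i][ord(S[i])-97] = i
def stepA (cs : List Char) (res : List (List Int)) (i : Int) : List (List Int) :=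
  let rowUp := res.getD (i.toNat + 1) []
  let row1 := (List.range 26).foldl (fun r j => r.set j (rowUp.getD j 0)) (res.getD i.toNat [])
  let c := cs.getD i.toNat ' '
  let row2 := pySetItem row1 ((c.toNat : Int) - 97) i
  res.set i.toNat row2

def calcNext (S : String) : List (List Int) :=
  let cs := S.toList
  let n : Int := (cs.length : Int)
  let res : List (List Int) := List.replicate (cs.length + 1) (List.replicate 26 n)
  (PySem.List.pyRange (n - 1) (-1) (-1)).foldl (stepA cs) res

-- ===== PORT B =====
-- the body of B's inner loop over i for the letter c of column j: update `last`, write res[i][j] = last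
def stepB (cs : List Char) (j : Nat) (c : Char) (p : List (List Int) × Int) (i : Int) : List (List Int) × Int :=
  let last := if cs.getD i.toNat ' ' = c then i else p.2
  (p.1.set i.toNat ((p.1.getD i.toNat []).set j last), last)

def calcNext_alt (S : String) : List (List Int) :=
  let cs := S.toList
  let n : Int := (cs.length : Int)
  let res : List (List Int) := List.replicate (cs.length + 1) (List.replicate 26 n)
  (List.range 26).foldl (fun res j =>
    let c := Char.ofNat (97 + j)
    ((PySem.List.pyRange (n - 1) (-1) (-1)).foldl (stepB cs j c) (res, n)).1) res

-- ===== PRECONDITION & SPEC =====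
-- Pre_ excludes exactly the strings on which A raises IndexError: a character with code < 71 ('G')
-- makes ord(c)-97 < -26, and code > 122 ('z') makes it ≥ 26 — both out of range for the 26-wide row.
def Pre_calcNext (S : String) : Prop := (S.toList.all (fun c => 'G' ≤ c && c ≤ 'z')) = true
instance (S : String) : Decidable (Pre_calcNext S) := by unfold Pre_calcNext; infer_instance
def pvWitness_calcNext : String := ("ab")

-- On strings containing a character below 'a' (inside Pre_ these are 'G'..'`', codes 71-96), A's
-- negative row index ord(c)-97 wraps around and records that position in the column of the letter
-- 26 codes higher, polluting the table; B ignores non-lowercase characters, the intended table for a-z.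
def D_calcNext (S : String) : Prop := (S.toList.any (fun c => c < 'a')) = true
instance (S : String) : Decidable (D_calcNext S) := by unfold D_calcNext; infer_instance

def Spec_calcNext (S : String) (out : List (List Int)) : Prop := ¬ D_calcNext S → out = calcNext_alt S
instance (S : String) (out : List (List Int)) : Decidable (Spec_calcNext S out) := by unfold Spec_calcNext; infer_instance

def pvDiffWitness_calcNext : String := ("G")
def pvDiffWitnessOut_calcNext : (List (List Int)) × (List (List Int)) :=
  ([[0, 1, 1, 1, 1, 1, 1, 1, 1, 1, 1, 1, 1, 1, 1, 1, 1, 1, 1, 1, 1, 1, 1, 1, 1, 1], [1, 1, 1, 1, 1, 1, 1, 1, 1, 1, 1, 1, 1, 1, 1, 1, 1, 1, 1, 1, 1, 1, 1, 1, 1, 1]],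
   [[1, 1, 1, 1, 1, 1, 1, 1, 1, 1, 1, 1, 1, 1, 1, 1, 1, 1, 1, 1, 1, 1, 1, 1, 1, 1], [1, 1, 1, 1, 1, 1, 1, 1, 1, 1, 1, 1, 1, 1, 1, 1, 1, 1, 1, 1, 1, 1, 1, 1, 1, 1]])

-- ===== CLAIM (what is proved, stated in full; the proofs are below) =====
def Claim_unchanged_calcNext : Prop := ∀ (S : String), Dom_calcNext S → Pre_calcNext S → Spec_calcNext S (calcNext S)
def Claim_changed_calcNext : Prop := Dom_calcNext (pvDiffWitness_calcNext) ∧ Pre_calcNext (pvDiffWitness_calcNext) ∧ D_calcNext (pvDiffWitness_calcNext) ∧ calcNext (pvDiffWitness_calcNext) = pvDiffWitnessOut_calcNext.1 ∧ calcNext_alt (pvDiffWitness_calcNext) = pvDiffWitnessOut_calcNext.2 ∧ pvDiffWitnessOut_calcNext.1 ≠ pvDiffWitnessOut_calcNext.2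

-- ===== LEMMAS AND PROOFS =====

-- `nxt cs c i` : the smallest k ≥ i with cs[k] = c, else cs.length (the value every table cell holds).
def nxt (cs : List Char) (c : Char) (i : Nat) : Int :=
  if h : i < cs.length then (if cs[i] = c then (i : Int) else nxt cs c (i + 1))
  else (cs.length : Int)
termination_by cs.length - i

-- the table after A has processed rows i0..n-1 (rows below i0 still hold the initial n)
def tblA (cs : List Char) (i0 : Nat) : List (List Int) :=
  (List.range (cs.length + 1)).map (fun k =>
    (List.range 26).map (fun j => if i0 ≤ k then nxt cs (Char.ofNat (97 + j)) k else (cs.length : Int)))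

-- the table after B has filled the first jd columns
def tblB (cs : List Char) (jd : Nat) : List (List Int) :=
  (List.range (cs.length + 1)).map (fun k =>
    (List.range 26).map (fun j => if j < jd then nxt cs (Char.ofNat (97 + j)) k else (cs.length : Int)))

-- the table during B's column-j pass: rows ≥ m of column j already filled
def colState (cs : List Char) (j m : Nat) : List (List Int) :=
  (List.range (cs.length + 1)).map (fun k =>
    (List.range 26).map (fun jj =>
      if jj < j then nxt cs (Char.ofNat (97 + jj)) k
      else if jj = j ∧ m ≤ k then nxt cs (Char.ofNat (97 + j)) k
      else (cs.length : Int)))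

-- lowercase hypothesis: every character of cs has code in 97..122
def Lower (cs : List Char) : Prop := ∀ c ∈ cs, 97 ≤ c.toNat ∧ c.toNat ≤ 122

theorem nxt_ge (cs : List Char) (c : Char) (i : Nat) (h : cs.length ≤ i) :
    nxt cs c i = (cs.length : Int) := by
  unfold nxt; rw [dif_neg (by omega)]

theorem nxt_lt (cs : List Char) (c : Char) (i : Nat) (h : i < cs.length) :
    nxt cs c i = (if cs[i] = c then (i : Int) else nxt cs c (i + 1)) := by
  conv_lhs => rw [nxt]
  rw [dif_pos h]

theorem set_map_range {α : Type} (n : Nat) (f : Nat → α) (k : Nat) (v : α) (_h : k < n) :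
    ((List.range n).map f).set k v = (List.range n).map (fun j => if j = k then v else f j) := by
  apply List.ext_getElem
  · simp
  · intro i hi1 hi2
    simp only [List.getElem_set, List.getElem_map, List.getElem_range]
    by_cases hik : k = i
    · simp [hik]
    · have hki : ¬ i = k := fun h' => hik h'.symm
      simp [hik, hki]

theorem replicate_eq_map_range {α : Type} (n : Nat) (x : α) :
    List.replicate n x = (List.range n).map (fun _ => x) := by
  rw [List.map_const']; simp

theorem copy_fold_aux (a : List Int) : ∀ (m : Nat) (r0 : List Int), r0.length = a.length → m ≤ a.length →
    (List.range m).foldl (fun r j => r.set j (a.getD j 0)) r0 = a.take m ++ r0.drop m := by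
  intro m
  induction m with
  | zero => intro r0 h hm; simp
  | succ m ih =>
    intro r0 h hm
    rw [List.range_succ, List.foldl_append, ih r0 h (by omega)]
    simp only [List.foldl_cons, List.foldl_nil]
    apply List.ext_getElem
    · simp; omega
    · intro i hi1 hi2
      have hm' : m < a.length := by omega
      have hi : i < a.length := by simp at hi1; omega
      have h1 : (a.take m).length = m := by simp; omega
      have h2 : (a.take (m+1)).length = m+1 := by simp; omega
      simp only [List.getElem_set]
      by_cases him : m = i
      · subst him
        rw [if_pos rfl]
        simp [h2, List.getElem_take, hm']
      · rw [if_neg him]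
        simp only [List.getElem_append, List.getElem_take, List.getElem_drop, h1, h2]
        split_ifs <;> first | rfl | omega | (congr 1; omega)

theorem copy_fold (a : List Int) (r0 : List Int) (h : r0.length = a.length) :
    (List.range a.length).foldl (fun r j => r.set j (a.getD j 0)) r0 = a := by
  rw [copy_fold_aux a a.length r0 h (le_refl _)]
  simp [h.le]

theorem charOfNat_toNat26 (j : Nat) (h : j < 26) : (Char.ofNat (97 + j)).toNat = 97 + j := by
  have hv : Nat.isValidChar (97 + j) := by left; omega
  simp [Char.toNat_ofNat, hv]

theorem char_le_iff (c d : Char) : c ≤ d ↔ c.toNat ≤ d.toNat := by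
  rw [Char.le_def, Char.toNat, Char.toNat, UInt32.le_iff_toNat_le]

theorem char_lt_iff (c d : Char) : c < d ↔ c.toNat < d.toNat := by
  rw [Char.lt_def, Char.toNat, Char.toNat, UInt32.lt_iff_toNat_lt]

theorem char_eq_iff (c d : Char) : c = d ↔ c.toNat = d.toNat := by
  constructor
  · rintro rfl; rfl
  · intro h; apply Char.ext; exact UInt32.toNat_inj.mp h

-- A's loop body turns the (i+1)-stage table into the i-stage table
theorem stepA_eq (cs : List Char) (hL : Lower cs) (m : Nat) (hm : m < cs.length) :
    stepA cs (tblA cs (m + 1)) (m : Int) = tblA cs m := by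
  have hmn : m < cs.length + 1 := by omega
  have hmn1 : m + 1 < cs.length + 1 := by omega
  have hc : cs.getD m ' ' = cs[m] := List.getD_eq_getElem cs ' ' hm
  obtain ⟨ht1, ht2⟩ := hL cs[m] (List.getElem_mem hm)
  set t := cs[m].toNat with htdef
  have hj0 : t - 97 < 26 := by omega
  unfold stepA tblA
  simp only [Int.toNat_natCast]
  rw [PySem.List.getD_map_range _ _ _ _ hmn1, PySem.List.getD_map_range _ _ _ _ hmn]
  have e1 : (m + 1 ≤ m + 1) = True := by simp
  have e2 : (m + 1 ≤ m) = False := by simp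
  simp only [e1, e2, if_true, if_false]
  -- the inner copy loop replaces the all-n row by the row above
  have hcopy : (List.range 26).foldl
      (fun r j => r.set j (((List.range 26).map (fun j => nxt cs (Char.ofNat (97 + j)) (m + 1))).getD j 0))
      ((List.range 26).map (fun _ => (cs.length : Int)))
      = (List.range 26).map (fun j => nxt cs (Char.ofNat (97 + j)) (m + 1)) := by
    have hlen : ((List.range 26).map (fun j => nxt cs (Char.ofNat (97 + j)) (m + 1))).length = 26 := by simp
    have hlen0 : ((List.range 26).map (fun _ : Nat => (cs.length : Int))).length = 26 := by simp
    calc (List.range 26).foldl _ _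
        = (List.range ((List.range 26).map (fun j => nxt cs (Char.ofNat (97 + j)) (m + 1))).length).foldl
            (fun r j => r.set j (((List.range 26).map (fun j => nxt cs (Char.ofNat (97 + j)) (m + 1))).getD j 0))
            ((List.range 26).map (fun _ => (cs.length : Int))) := by rw [hlen]
      _ = _ := copy_fold _ _ (by rw [hlen, hlen0])
  rw [hcopy, hc]
  -- the single assignment res[i][ord(c)-97] = i
  have hidx : (0:Int) ≤ (t : Int) - 97 := by omega
  rw [pySetItem, if_pos hidx]
  have hton : ((t : Int) - 97).toNat = t - 97 := by omega
  rw [hton, set_map_range 26 _ _ _ hj0]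
  -- the updated row is exactly the stage-m row of the table
  have hrow : (List.range 26).map (fun j => if j = t - 97 then (m : Int) else nxt cs (Char.ofNat (97 + j)) (m + 1))
      = (List.range 26).map (fun j => nxt cs (Char.ofNat (97 + j)) m) := by
    apply List.map_congr_left
    intro j hj
    have hj26 : j < 26 := List.mem_range.mp hj
    rw [nxt_lt cs _ m hm]
    have hcj : cs[m] = Char.ofNat (97 + j) ↔ j = t - 97 := by
      rw [char_eq_iff, charOfNat_toNat26 j hj26, ← htdef]
      omega
    by_cases he : j = t - 97
    · rw [if_pos he, if_pos (hcj.mpr he)]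
    · rw [if_neg he, if_neg (fun hh => he (hcj.mp hh))]
  rw [hrow, set_map_range (cs.length + 1) _ _ _ hmn]
  apply List.map_congr_left
  intro k hk
  by_cases hkm : k = m
  · subst hkm
    rw [if_pos rfl]
    simp
  · rw [if_neg hkm]
    have h2 : (m + 1 ≤ k) = (m ≤ k) := by
      apply propext; constructor <;> intro <;> omega
    simp only [h2]

-- folding A's loop body down from row m-1 finishes the table
theorem foldA (cs : List Char) (hL : Lower cs) : ∀ (m : Nat), m ≤ cs.length →
    (PySem.List.pyRange ((m : Int) - 1) (-1) (-1)).foldl (stepA cs) (tblA cs m) = tblA cs 0 := by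
  intro m
  induction m with
  | zero =>
    intro _
    rw [PySem.List.pyRange_neg_one_eq_nil (by omega)]
    simp
  | succ m ih =>
    intro hm
    have harg : ((m + 1 : Nat) : Int) - 1 = (m : Int) := by push_cast; ring
    rw [harg, PySem.List.pyRange_neg_one_cons (by omega), List.foldl_cons,
      stepA_eq cs hL m (by omega), ih (by omega)]

-- the initial all-n table is the stage-n table (row n is n in every column)
theorem init_eq_tblA (cs : List Char) :
    List.replicate (cs.length + 1) (List.replicate 26 (cs.length : Int)) = tblA cs cs.length := by
  unfold tblA
  rw [replicate_eq_map_range]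
  apply List.map_congr_left
  intro k hk
  have hk' : k < cs.length + 1 := List.mem_range.mp hk
  rw [replicate_eq_map_range]
  apply List.map_congr_left
  intro j _
  by_cases h : cs.length ≤ k
  · rw [if_pos h, nxt_ge cs _ k h]
  · rw [if_neg h]

theorem calcNext_eq_tblA (S : String) (hL : Lower S.toList) : calcNext S = tblA S.toList 0 := by
  show (PySem.List.pyRange ((S.toList.length : Int) - 1) (-1) (-1)).foldl (stepA S.toList)
      (List.replicate (S.toList.length + 1) (List.replicate 26 (S.toList.length : Int))) = tblA S.toList 0
  rw [init_eq_tblA, foldA S.toList hL S.toList.length (le_refl _)]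

-- B's inner loop body moves the column-j pass one row down
theorem stepB_eq (cs : List Char) (j : Nat) (hj : j < 26) (m : Nat) (hm : m < cs.length) :
    stepB cs j (Char.ofNat (97 + j)) (colState cs j (m + 1), nxt cs (Char.ofNat (97 + j)) (m + 1)) (m : Int)
      = (colState cs j m, nxt cs (Char.ofNat (97 + j)) m) := by
  have hmn : m < cs.length + 1 := by omega
  have hval : cs[m]?.getD ' ' = cs[m] := by rw [List.getElem?_eq_getElem hm]; rfl
  have hlast : (if cs.getD m ' ' = Char.ofNat (97 + j) then ((m : Nat) : Int)
      else nxt cs (Char.ofNat (97 + j)) (m + 1)) = nxt cs (Char.ofNat (97 + j)) m := by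
    rw [List.getD_eq_getElem cs ' ' hm, nxt_lt cs _ m hm]
  unfold stepB
  simp only [Int.toNat_natCast, List.getD_eq_getElem?_getD, hval] at hlast ⊢
  rw [hlast]
  congr 1
  rw [← List.getD_eq_getElem?_getD]
  unfold colState
  rw [PySem.List.getD_map_range _ _ _ _ hmn, set_map_range 26 _ _ _ hj,
    set_map_range (cs.length + 1) _ _ _ hmn]
  apply List.map_congr_left
  intro k hk
  by_cases hkm : k = m
  · rw [if_pos hkm]
    apply List.map_congr_left
    intro jj _
    rw [hkm]
    by_cases hjj : jj = j
    · rw [if_pos hjj, hjj]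
      have h1 : ¬ (j < j) := lt_irrefl j
      rw [if_neg h1, if_pos ⟨rfl, le_refl m⟩]
    · rw [if_neg hjj]
      by_cases hlt : jj < j
      · rw [if_pos hlt, if_pos hlt]
      · rw [if_neg hlt, if_neg hlt,
          if_neg (fun hh : jj = j ∧ m + 1 ≤ m => hjj hh.1),
          if_neg (fun hh : jj = j ∧ m ≤ m => hjj hh.1)]
  · rw [if_neg hkm]
    apply List.map_congr_left
    intro jj _
    have e : (m + 1 ≤ k) = (m ≤ k) := by
      apply propext; constructor <;> intro <;> omega
    simp only [e]

-- B's inner fold over rows m-1..0 completes column j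
theorem foldB (cs : List Char) (j : Nat) (hj : j < 26) : ∀ (m : Nat), m ≤ cs.length →
    (PySem.List.pyRange ((m : Int) - 1) (-1) (-1)).foldl (stepB cs j (Char.ofNat (97 + j)))
      (colState cs j m, nxt cs (Char.ofNat (97 + j)) m)
    = (colState cs j 0, nxt cs (Char.ofNat (97 + j)) 0) := by
  intro m
  induction m with
  | zero =>
    intro _
    rw [PySem.List.pyRange_neg_one_eq_nil (by omega)]
    simp
  | succ m ih =>
    intro hm
    have harg : ((m + 1 : Nat) : Int) - 1 = (m : Int) := by push_cast; ring
    rw [harg, PySem.List.pyRange_neg_one_cons (by omega), List.foldl_cons,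
      stepB_eq cs j hj m (by omega), ih (by omega)]

theorem colState_start (cs : List Char) (j : Nat) : colState cs j cs.length = tblB cs j := by
  unfold colState tblB
  apply List.map_congr_left
  intro k hk
  have hk' : k < cs.length + 1 := List.mem_range.mp hk
  apply List.map_congr_left
  intro jj _
  by_cases hlt : jj < j
  · rw [if_pos hlt, if_pos hlt]
  · rw [if_neg hlt, if_neg hlt]
    by_cases h2 : jj = j ∧ cs.length ≤ k
    · rw [if_pos h2]
      have : k = cs.length := by omega
      rw [this, nxt_ge cs _ cs.length (le_refl _)]
    · rw [if_neg h2]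

theorem colState_end (cs : List Char) (j : Nat) : colState cs j 0 = tblB cs (j + 1) := by
  unfold colState tblB
  apply List.map_congr_left
  intro k _
  apply List.map_congr_left
  intro jj _
  by_cases hlt : jj < j
  · rw [if_pos hlt, if_pos (by omega : jj < j + 1)]
  · rw [if_neg hlt]
    by_cases hjj : jj = j
    · rw [if_pos ⟨hjj, Nat.zero_le k⟩, if_pos (by omega : jj < j + 1), hjj]
    · rw [if_neg (fun hh => hjj hh.1), if_neg (by omega : ¬ jj < j + 1)]

theorem init_eq_tblB (cs : List Char) :
    List.replicate (cs.length + 1) (List.replicate 26 (cs.length : Int)) = tblB cs 0 := by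
  unfold tblB
  rw [replicate_eq_map_range]
  apply List.map_congr_left
  intro k _
  rw [replicate_eq_map_range]
  apply List.map_congr_left
  intro j _
  rw [if_neg (by omega : ¬ j < 0)]

theorem foldOuter (cs : List Char) : ∀ (jd : Nat), jd ≤ 26 →
    (List.range jd).foldl (fun res j =>
      ((PySem.List.pyRange ((cs.length : Int) - 1) (-1) (-1)).foldl (stepB cs j (Char.ofNat (97 + j)))
        (res, (cs.length : Int))).1) (tblB cs 0)
    = tblB cs jd := by
  intro jd
  induction jd with
  | zero => intro _; simp
  | succ jd ih =>
    intro hjd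
    rw [List.range_succ, List.foldl_append, ih (by omega), List.foldl_cons, List.foldl_nil]
    have hn : (cs.length : Int) = nxt cs (Char.ofNat (97 + jd)) cs.length :=
      (nxt_ge cs _ cs.length (le_refl _)).symm
    rw [show ((tblB cs jd, (cs.length : Int)) : List (List Int) × Int)
        = (colState cs jd cs.length, nxt cs (Char.ofNat (97 + jd)) cs.length) by
      rw [colState_start, ← hn],
      foldB cs jd (by omega) cs.length (le_refl _), colState_end]

theorem calcNext_alt_eq (S : String) : calcNext_alt S = tblB S.toList 26 := by
  show (List.range 26).foldl (fun res j =>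
      ((PySem.List.pyRange ((S.toList.length : Int) - 1) (-1) (-1)).foldl
        (stepB S.toList j (Char.ofNat (97 + j))) (res, (S.toList.length : Int))).1)
      (List.replicate (S.toList.length + 1) (List.replicate 26 (S.toList.length : Int)))
    = tblB S.toList 26
  rw [init_eq_tblB, foldOuter S.toList 26 (le_refl _)]

theorem tblA_zero_eq_tblB (cs : List Char) : tblA cs 0 = tblB cs 26 := by
  unfold tblA tblB
  apply List.map_congr_left
  intro k _
  apply List.map_congr_left
  intro j hj
  rw [if_pos (Nat.zero_le k), if_pos (List.mem_range.mp hj)]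

-- ===== VERDICT (by name: the statement is the Claim_ definition above) =====
theorem calcNext_spec : Claim_unchanged_calcNext := by
  intro S _ hPre hD
  rw [Pre_calcNext, List.all_eq_true] at hPre
  rw [D_calcNext] at hD
  have hL : Lower S.toList := by
    intro c hc
    have h1 := hPre c hc
    have h2 : ¬ (c < 'a') := by
      intro hh
      exact hD (List.any_eq_true.mpr ⟨c, hc, by simp [hh]⟩)
    simp only [Bool.and_eq_true, decide_eq_true_eq] at h1
    simp only [char_le_iff] at h1
    rw [char_lt_iff] at h2
    have ea : 'a'.toNat = 97 := rfl
    have ez : 'z'.toNat = 122 := rfl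
    rw [ea] at h2; rw [ez] at h1
    omega
  rw [calcNext_eq_tblA S hL, calcNext_alt_eq, tblA_zero_eq_tblB]

set_option maxRecDepth 16000 in
theorem calcNext_changed : Claim_changed_calcNext := by
  unfold Claim_changed_calcNext
  refine ⟨?_, ?_, ?_, ?_, ?_, ?_⟩ <;> decide
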